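-- pv_equiv track=rewrite | github.com/natcobbinah/Python_prog | python_dsa - Dr Basant Agarwal et al/trees/expression_tree/basic_calculator.py | cleanExpression
-- ===== SOURCE A (Python) =====
-- def cleanExpression(expression):
--     final_expr = ""
--     expression = expression.replace(" ", "")
--     i = 0
--
--     while i < len(expression):
--         if (expression[i] == "+" or expression[i] == "-"):
--             if (i == 0 or expression[i - 1] == "("):
--                 final_expr += '0'
--         final_expr += expression[i]
--         i += 1
--     return final_expr
-- ===== SOURCE B (Python) =====
-- def cleanExpression(expression):
--     parts = expression.replace(" ", "").split("(")
--     return "(".join("0" + p if p[:1] in ("+", "-") else p for p in parts)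
-- ===== Notes on version B (the rewrite author's own statement) =====
-- stated objective: idiomatic
-- what changed: Replaces the index-based while loop with prev-character bookkeeping by staged passes: split the space-stripped string on the open parenthesis, prepend a zero to every segment starting with a sign, and rejoin; repeated string concatenation disappears.
import Mathlib
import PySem

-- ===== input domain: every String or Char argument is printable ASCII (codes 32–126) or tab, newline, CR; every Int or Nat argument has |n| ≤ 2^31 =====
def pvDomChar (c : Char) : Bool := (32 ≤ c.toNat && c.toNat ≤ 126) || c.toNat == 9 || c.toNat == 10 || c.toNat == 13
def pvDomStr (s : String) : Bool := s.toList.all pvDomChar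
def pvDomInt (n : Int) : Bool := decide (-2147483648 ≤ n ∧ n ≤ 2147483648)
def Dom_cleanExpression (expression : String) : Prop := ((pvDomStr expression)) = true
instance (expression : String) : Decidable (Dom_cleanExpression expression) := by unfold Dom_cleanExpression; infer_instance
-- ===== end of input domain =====

-- B replaces A's index loop with prev-character bookkeeping by staged passes: split on '(', prepend '0' to
-- every segment that starts with '+'/'-', rejoin with '(' (idiomatic; same results).

-- ===== PORT A =====
-- the while loop: i scans the space-stripped string, prepending '0' to final_expr before '+'/'-' at position 0 or after '('
def cleanA_loop (cs : List Char) (i : Nat) (acc : List Char) : List Char :=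
  if h : i < cs.length then
    let acc1 := if (cs[i] = '+' ∨ cs[i] = '-') ∧ (i = 0 ∨ cs.getD (i-1) ' ' = '(') then acc ++ ['0'] else acc
    cleanA_loop cs (i+1) (acc1 ++ [cs[i]])
  else acc
termination_by cs.length - i

def cleanExpression (expression : String) : String :=
  String.mk (cleanA_loop (PySem.Str.replace expression " " "").toList 0 [])

-- ===== PORT B =====
-- '"0" + p if p[:1] in ("+", "-") else p' for one segment p
def bFix (p : List Char) : List Char :=
  if PySem.Chars.slice p none (some 1) = ['+'] ∨ PySem.Chars.slice p none (some 1) = ['-'] then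
    '0' :: p
  else p

def cleanExpression_alt (expression : String) : String :=
  let parts := PySem.Chars.splitOn (PySem.Str.replace expression " " "").toList ['(']
  String.mk (PySem.Chars.join ['('] (parts.map bFix))

-- ===== PRECONDITION & SPEC =====
def Spec_cleanExpression (expression : String) (out : String) : Prop := out = cleanExpression_alt expression
instance (expression : String) (out : String) : Decidable (Spec_cleanExpression expression out) := by unfold Spec_cleanExpression; infer_instance

-- ===== CLAIM (what is proved, stated in full; the proofs are below) =====
def Claim_equal_cleanExpression : Prop := ∀ (expression : String), Dom_cleanExpression expression → Spec_cleanExpression expression (cleanExpression expression)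

-- ===== LEMMAS AND PROOFS =====

-- one emitted step of A, with the previous character as an Option ('none' = position 0)
def bEmit (pc : Option Char × Char) : List Char :=
  if (pc.2 = '+' ∨ pc.2 = '-') ∧ (pc.1 = none ∨ pc.1 = some '(') then ['0', pc.2] else [pc.2]

lemma cleanA_loop_eq (cs : List Char) : ∀ n i acc, cs.length - i = n →
    cleanA_loop cs i acc = acc ++ (((none :: cs.map some).zip cs).drop i).flatMap bEmit := by
  intro n
  induction n with
  | zero =>
    intro i acc h
    rw [cleanA_loop]
    have hi : ¬ i < cs.length := by omega
    have hz : (((none :: cs.map some).zip cs).drop i) = [] := by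
      apply List.drop_eq_nil_of_le
      simp [List.length_zip]
      omega
    simp [hi, hz]
  | succ n ih =>
    intro i acc h
    have hi : i < cs.length := by omega
    have hzl : i < ((none :: cs.map some).zip cs).length := by
      simp [List.length_zip]; omega
    have hd : (((none :: cs.map some).zip cs).drop i)
        = ((none :: cs.map some)[i]'(by simp; omega), cs[i]) :: (((none :: cs.map some).zip cs).drop (i+1)) := by
      rw [List.drop_eq_getElem_cons hzl, List.getElem_zip]
    rw [cleanA_loop]
    simp only [hi, dif_pos]
    rw [ih (i+1) _ (by omega)]
    rw [hd]
    simp only [List.flatMap_cons]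
    rcases Nat.eq_zero_or_pos i with h0 | hpos
    · subst h0
      simp only [List.getElem_cons_zero]
      by_cases hc : cs[0] = '+' ∨ cs[0] = '-'
      · simp [bEmit, hc]
      · simp [bEmit, hc]
    · have hprev : (none :: cs.map some)[i]'(by simp; omega) = some (cs[i-1]'(by omega)) := by
        obtain ⟨j, rfl⟩ : ∃ j, i = j + 1 := ⟨i - 1, by omega⟩
        simp
      have hgetD : cs.getD (i-1) ' ' = cs[i-1]'(by omega) := by
        rw [List.getD_eq_getElem?_getD, List.getElem?_eq_getElem (by omega)]
        rfl
      rw [hprev, hgetD]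
      have hi0 : ¬ i = 0 := by omega
      by_cases hc : cs[i] = '+' ∨ cs[i] = '-'
      · by_cases hp : cs[i-1]'(by omega) = '('
        · simp [bEmit, hc, hp, hi0]
        · simp [bEmit, hc, hp, hi0]
      · simp [bEmit, hc, hi0]

-- structural model of splitOn on the one-character separator '('
def mySplit : List Char → List (List Char)
  | [] => [[]]
  | c :: t =>
    if c = '(' then [] :: mySplit t
    else
      match mySplit t with
      | h :: tl => (c :: h) :: tl
      | [] => [[c]]

lemma mySplit_ne_nil (cs : List Char) : mySplit cs ≠ [] := by
  cases cs with
  | nil => simp [mySplit]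
  | cons c t =>
    simp only [mySplit]
    split
    · simp
    · split <;> simp

lemma go_eq_mySplit : ∀ (fuel : Nat) (l cur : List Char) (acc : List (List Char)),
    l.length ≤ fuel →
    PySem.Chars.splitOn.go ['('] fuel l cur acc
      = acc.reverse ++ (mySplit l).modifyHead (cur.reverse ++ ·) := by
  intro fuel
  induction fuel with
  | zero =>
    intro l cur acc h
    have : l = [] := by cases l <;> simp_all
    subst this
    rw [PySem.Chars.splitOn.go.eq_def]
    simp [mySplit]
  | succ n ih =>
    intro l cur acc h
    cases l with
    | nil =>
      rw [PySem.Chars.splitOn.go.eq_def]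
      simp [mySplit]
    | cons c rest =>
      rw [PySem.Chars.splitOn.go.eq_def]
      by_cases hc : c = '('
      · subst hc
        have hpre : List.isPrefixOf ['('] ('(' :: rest) = true := by
          simp [List.isPrefixOf]
        simp only [hpre, if_pos]
        rw [ih _ _ _ (by simp at h ⊢; omega)]
        simp [mySplit, List.modifyHead]
        cases mySplit rest <;> simp
      · have hpre : List.isPrefixOf ['('] (c :: rest) = false := by
          simp [List.isPrefixOf]
          exact fun h' => hc h'.symm
        simp only [hpre, Bool.false_eq_true, if_false]
        rw [ih _ _ _ (by simp at h ⊢; omega)]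
        simp only [mySplit, hc, if_false]
        cases hms : mySplit rest with
        | nil => exact absurd hms (mySplit_ne_nil rest)
        | cons hseg tl => simp

lemma splitOn_eq_mySplit (l : List Char) : PySem.Chars.splitOn l ['('] = mySplit l := by
  unfold PySem.Chars.splitOn
  rw [go_eq_mySplit (l.length + 1) l [] [] (by omega)]
  cases hms : mySplit l with
  | nil => exact absurd hms (mySplit_ne_nil l)
  | cons h tl => simp

lemma bFix_nil : bFix [] = [] := by decide

lemma bFix_cons (c : Char) (h : List Char) :
    bFix (c :: h) = if c = '+' ∨ c = '-' then '0' :: c :: h else c :: h := by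
  have hs : PySem.Chars.slice (c :: h) none (some 1) = [c] := by
    rw [PySem.Chars.slice_eq_listSlice, PySem.List.slice_to _ (by omega)]
    simp
  unfold bFix
  rw [hs]
  by_cases hc : c = '+' ∨ c = '-'
  · rcases hc with hc | hc <;> subst hc <;> simp
  · rw [not_or] at hc
    simp [hc.1, hc.2]

-- A's emitted stream as a function of (previous character, remaining input)
def emitF (prev : Option Char) (cs : List Char) : List Char :=
  ((prev :: cs.map some).zip cs).flatMap bEmit

lemma emitF_cons (prev : Option Char) (c : Char) (t : List Char) :
    emitF prev (c :: t) = bEmit (prev, c) ++ emitF (some c) t := by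
  simp [emitF]

-- join with the FIRST segment left unfixed (it continues an already-open segment)
def joinRaw (cs : List Char) : List Char :=
  match mySplit cs with
  | h :: tl => PySem.Chars.join ['('] (h :: tl.map bFix)
  | [] => []

lemma join_head (x : List Char) (ys : List (List Char)) :
    PySem.Chars.join ['('] (x :: ys)
      = x ++ (match ys with | [] => [] | y :: tl => '(' :: PySem.Chars.join ['('] (y :: tl)) := by
  cases ys with
  | nil => simp [PySem.Chars.join_singleton]
  | cons y tl => rw [PySem.Chars.join_cons_cons]; simp

lemma main_lemma (cs : List Char) :
    emitF none cs = PySem.Chars.join ['('] ((mySplit cs).map bFix)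
    ∧ ∀ p, p ≠ '(' → emitF (some p) cs = joinRaw cs := by
  induction cs with
  | nil =>
    constructor
    · simp [emitF, mySplit, bFix_nil, PySem.Chars.join_singleton]
    · intro p _; simp [emitF, joinRaw, mySplit, PySem.Chars.join_singleton]
  | cons c t ih =>
    obtain ⟨ih1, ih2⟩ := ih
    by_cases hc : c = '('
    · subst hc
      have hstep : emitF (some '(') t = emitF none t := by
        cases t with
        | nil => simp [emitF]
        | cons d u =>
          rw [emitF_cons, emitF_cons]
          congr 1
          simp [bEmit]
      constructor
      · rw [emitF_cons]
        have hE : bEmit (none, '(') = ['('] := by decide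
        rw [hE, hstep, ih1]
        have hmsp : mySplit ('(' :: t) = [] :: mySplit t := by simp [mySplit]
        rw [hmsp, List.map_cons, bFix_nil, join_head]
        cases hms : mySplit t with
        | nil => exact absurd hms (mySplit_ne_nil t)
        | cons h tl => simp
      · intro p _
        rw [emitF_cons]
        have hE : bEmit (some p, '(') = ['('] := by simp [bEmit]
        rw [hE, hstep, ih1]
        have hmsp : mySplit ('(' :: t) = [] :: mySplit t := by simp [mySplit]
        unfold joinRaw
        rw [hmsp]
        dsimp only
        rw [join_head]
        cases hms : mySplit t with
        | nil => exact absurd hms (mySplit_ne_nil t)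
        | cons h tl => simp
    · -- c is not '('
      have htail : emitF (some c) t = joinRaw t := ih2 c hc
      have hsplit : ∃ h tl, mySplit t = h :: tl := by
        cases hms : mySplit t with
        | nil => exact absurd hms (mySplit_ne_nil t)
        | cons h tl => exact ⟨h, tl, rfl⟩
      obtain ⟨h, tl, hms⟩ := hsplit
      have hmsc : mySplit (c :: t) = (c :: h) :: tl := by
        simp [mySplit, hc, hms]
      have hraw : joinRaw t = h ++ (match tl.map bFix with | [] => [] | y :: tl' => '(' :: PySem.Chars.join ['('] (y :: tl')) := by
        unfold joinRaw
        rw [hms]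
        dsimp only
        rw [join_head]
      have hrawc : joinRaw (c :: t) = c :: joinRaw t := by
        unfold joinRaw
        rw [hmsc, hms]
        dsimp only
        rw [join_head, join_head, List.cons_append]
      constructor
      · rw [emitF_cons, htail]
        rw [hmsc]
        simp only [List.map_cons]
        rw [bFix_cons, join_head, hraw]
        by_cases hpm : c = '+' ∨ c = '-'
        · have hE : bEmit (none, c) = ['0', c] := by simp [bEmit, hpm]
          rw [hE]
          simp [hpm]
        · have hE : bEmit (none, c) = [c] := by simp [bEmit, hpm]
          rw [hE]
          simp [hpm]
      · intro p hp
        rw [emitF_cons, htail, hrawc]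
        have hE : bEmit (some p, c) = [c] := by simp [bEmit, hp]
        rw [hE]
        simp

-- ===== VERDICT (by name: the statement is the Claim_ definition above) =====
theorem cleanExpression_spec : Claim_equal_cleanExpression := by
  intro expression _
  unfold Spec_cleanExpression cleanExpression cleanExpression_alt
  rw [cleanA_loop_eq _ _ 0 [] rfl]
  rw [splitOn_eq_mySplit]
  have := (main_lemma (PySem.Str.replace expression " " "").toList).1
  unfold emitF at this
  simp only [List.nil_append, List.drop_zero]
  rw [this]
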